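-- pv_equiv track=rewrite | github.com/Furkanahii/Rheo-MVP | Cmpe 150/Cmpe HW4/CMPE150HW3/2023400312_HW3.py | library_system
-- ===== SOURCE A (Python) =====
-- def library_system(lines):
--     output_lines = []
--     book_holder = dict()
--     user_books = dict()
--     user_order = []
--
--     def register_user(name):
--         if name not in user_books:
--             user_books[name] = []
--             user_order.append(name)
--
--     def format_datetime(timestamp):
--         date = timestamp[:10].replace("-", "/")
--         time = timestamp[11:].replace("-", ":")
--         return date, time
--
--     for raw_line in lines:
--         line = raw_line.strip()
--         if not line:
--             continue
--
--         # kayip kitap listesi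
--         if line == "Currently missing books.":
--             missing = sorted(book_holder.keys())
--             text = "Missing books are:" if not missing else "Missing books are: " + ", ".join(missing)
--             output_lines.append(text)
--             continue
--
--         # people/books
--         if line == "Books borrowed by people.":
--             for person in user_order:
--                 books = user_books[person]
--                 if books:
--                     # kitaplari alfabetik olarak siralama
--                     sorted_books = sorted(books)
--                     info = f"{person} borrowed {len(sorted_books)} books: " + ", ".join(sorted_books)
--                     output_lines.append(info)
--             continue
--
--         # borrow/return islemleri
--         parts = line.split()
--         if len(parts) < 4:
--             continue
--
--         timestamp = parts[0]
--         name = parts[-3]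
--         action = parts[-2]
--         book = parts[-1]
--
--         date, time = format_datetime(timestamp)
--         register_user(name)
--
--         if action == "Borrow":
--             if book in book_holder:  # zaten alinmissa
--                 msg = f"{name} requested {book} on {date} at {time} - book not available"
--             else:
--                 book_holder[book] = name
--                 user_books[name].append(book)
--                 msg = f"{name} borrowed {book} on {date} at {time}"
--             output_lines.append(msg)
--
--         elif action == "Return":
--             if book in book_holder:  # kitap gercekten oduncteyse
--                 actual_holder = book_holder[book]
--                 if actual_holder in user_books and book in user_books[actual_holder]:
--                     user_books[actual_holder].remove(book)
--                 del book_holder[book]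
--             msg = f"{name} returned {book} on {date} at {time}"
--             output_lines.append(msg)
--
--     return "\n".join(output_lines).rstrip("\n")
--
--
--     # === END OF YOUR SOLUTION ===
--     ########## DO NOT CHANGE THE CODE BELOW ##########
--
--     output_lines.append("")
--     return "\n".join(output_lines).rstrip("\n")
-- ===== SOURCE B (Python) =====
-- def library_system(lines):
--     # Simpler state: only book -> holder and the user registration order are kept.
--     # Per-user book lists are reconstructed by a single group-by pass when (and only
--     # when) the "Books borrowed by people." query is asked.
--     output = []
--     book_holder = {}
--     user_order = []
--
--     for raw_line in lines:
--         line = raw_line.strip()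
--         if not line:
--             continue
--
--         if line == "Currently missing books.":
--             missing = sorted(book_holder)
--             output.append("Missing books are:" if not missing else
--                           "Missing books are: " + ", ".join(missing))
--             continue
--
--         if line == "Books borrowed by people.":
--             held = {}
--             for book, holder in book_holder.items():
--                 held.setdefault(holder, []).append(book)
--             for person in user_order:
--                 books = sorted(held.get(person, []))
--                 if books:
--                     output.append(f"{person} borrowed {len(books)} books: " + ", ".join(books))
--             continue
--
--         parts = line.split()
--         if len(parts) < 4:
--             continue
--
--         timestamp, name, action, book = parts[0], parts[-3], parts[-2], parts[-1]
--         date = timestamp[:10].replace("-", "/")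
--         time = timestamp[11:].replace("-", ":")
--         if name not in user_order:
--             user_order.append(name)
--
--         if action == "Borrow":
--             if book in book_holder:
--                 output.append(f"{name} requested {book} on {date} at {time} - book not available")
--             else:
--                 book_holder[book] = name
--                 output.append(f"{name} borrowed {book} on {date} at {time}")
--         elif action == "Return":
--             book_holder.pop(book, None)
--             output.append(f"{name} returned {book} on {date} at {time}")
--
--     return "\n".join(output)
-- ===== Notes on version B (the rewrite author's own statement) =====
-- stated objective: simpler
-- what changed: B drops the maintained per-user book lists (user_books) entirely: it keeps only book->holder and the registration order, and answers the 'Books borrowed by people.' query by one group-by pass over book_holder; borrow/return just insert/delete in book_holder, and the final rstrip('\n') (always a no-op) is gone.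
import Mathlib
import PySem

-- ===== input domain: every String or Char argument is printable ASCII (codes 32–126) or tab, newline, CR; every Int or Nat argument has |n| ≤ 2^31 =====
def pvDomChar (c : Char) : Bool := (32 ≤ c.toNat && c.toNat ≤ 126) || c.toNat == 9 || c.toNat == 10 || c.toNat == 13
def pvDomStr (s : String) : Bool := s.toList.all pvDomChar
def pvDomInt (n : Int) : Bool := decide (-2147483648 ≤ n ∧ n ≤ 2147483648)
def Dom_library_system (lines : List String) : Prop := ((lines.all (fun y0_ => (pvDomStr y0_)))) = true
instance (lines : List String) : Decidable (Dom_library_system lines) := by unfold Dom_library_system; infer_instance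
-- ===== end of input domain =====

-- B drops A's maintained per-user book lists and instead answers the per-person query
-- by one group-by pass over the book->holder dict; A's trailing rstrip("\n") (a no-op,
-- as proved here) is gone.  Objective: simpler state.

-- ===== PORT A =====

-- exact port of str.rstrip("\n") (the strip set contains only '\n')
def pyRstripNl (s : String) : String :=
  String.ofList ((s.toList.reverse.dropWhile (fun c => c == '\n')).reverse)

-- format_datetime: (timestamp[:10].replace("-","/"), timestamp[11:].replace("-",":"))
def libA_fmt (ts : String) : String × String :=
  (PySem.Str.replace (PySem.Str.slice ts none (some 10)) "-" "/",
   PySem.Str.replace (PySem.Str.slice ts (some 11) none) "-" ":")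

-- register_user
def libA_register (ub : PySem.Dict String (List String)) (uo : List String) (name : String) :
    PySem.Dict String (List String) × List String :=
  if ub.contains name then (ub, uo) else (ub.insert name [], uo ++ [name])

-- one iteration of A's main loop; state = (output_lines, book_holder, user_books, user_order)
def libA_step
    (st : List String × PySem.Dict String String × PySem.Dict String (List String) × List String)
    (raw : String) :
    List String × PySem.Dict String String × PySem.Dict String (List String) × List String :=
  let (out, bh, ub, uo) := st
  let line := PySem.Str.strip raw
  if line = "" then (out, bh, ub, uo)
  else if line = "Currently missing books." then
    let missing := PySem.List.sorted bh.keys (fun x => x) false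
    let text := if missing = [] then "Missing books are:"
                else "Missing books are: " ++ PySem.Str.join ", " missing
    (out ++ [text], bh, ub, uo)
  else if line = "Books borrowed by people." then
    (uo.foldl (fun o person =>
        let books := ub.getD person []
        if books = [] then o
        else
          let sb := PySem.List.sorted books (fun x => x) false
          o ++ [person ++ " borrowed " ++ PySem.Int.toStr (sb.length : Int) ++ " books: " ++
                PySem.Str.join ", " sb]) out,
     bh, ub, uo)
  else
    let parts := PySem.Str.split₀ line
    if parts.length < 4 then (out, bh, ub, uo)
    else
      -- parts[0], parts[-3], parts[-2], parts[-1] on a list of length ≥ 4 (guarded, in range)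
      let ts := parts.getD 0 ""
      let name := parts.getD (parts.length - 3) ""
      let action := parts.getD (parts.length - 2) ""
      let book := parts.getD (parts.length - 1) ""
      let dt := libA_fmt ts
      let r := libA_register ub uo name
      if action = "Borrow" then
        if bh.contains book then
          (out ++ [name ++ " requested " ++ book ++ " on " ++ dt.1 ++ " at " ++ dt.2 ++
                   " - book not available"], bh, r.1, r.2)
        else
          (out ++ [name ++ " borrowed " ++ book ++ " on " ++ dt.1 ++ " at " ++ dt.2],
           bh.insert book name, (r.1).modify name [] (· ++ [book]), r.2)
      else if action = "Return" then
        if bh.contains book then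
          let holder := bh.getD book ""
          -- user_books[actual_holder].remove(book) under A's membership guard
          let ub' :=
            if (r.1).contains holder && ((r.1).getD holder []).contains book then
              match PySem.List.remove? ((r.1).getD holder []) book with
              | some l => (r.1).insert holder l
              | none => r.1
            else r.1
          (out ++ [name ++ " returned " ++ book ++ " on " ++ dt.1 ++ " at " ++ dt.2],
           bh.erase book, ub', r.2)
        else
          (out ++ [name ++ " returned " ++ book ++ " on " ++ dt.1 ++ " at " ++ dt.2],
           bh, r.1, r.2)
      else (out, bh, r.1, r.2)

def library_system (lines : List String) : String :=
  pyRstripNl (PySem.Str.join "\n"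
    (lines.foldl libA_step ([], PySem.Dict.empty, PySem.Dict.empty, [])).1)

-- ===== PORT B =====

-- one iteration of B's loop; state = (output, book_holder, user_order) — no per-user lists
def libB_step (st : List String × PySem.Dict String String × List String) (raw : String) :
    List String × PySem.Dict String String × List String :=
  let (out, bh, uo) := st
  let line := PySem.Str.strip raw
  if line = "" then (out, bh, uo)
  else if line = "Currently missing books." then
    let missing := PySem.List.sorted bh.keys (fun x => x) false
    let text := if missing = [] then "Missing books are:"
                else "Missing books are: " ++ PySem.Str.join ", " missing
    (out ++ [text], bh, uo)
  else if line = "Books borrowed by people." then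
    -- group-by pass: held[holder].append(book) for (book, holder) in book_holder.items()
    let held := bh.items.foldl
      (fun d p => d.modify p.2 [] (· ++ [p.1])) (PySem.Dict.empty : PySem.Dict String (List String))
    (uo.foldl (fun o person =>
        let books := PySem.List.sorted (held.getD person []) (fun x => x) false
        if books = [] then o
        else o ++ [person ++ " borrowed " ++ PySem.Int.toStr (books.length : Int) ++ " books: " ++
                   PySem.Str.join ", " books]) out,
     bh, uo)
  else
    let parts := PySem.Str.split₀ line
    if parts.length < 4 then (out, bh, uo)
    else
      -- parts[0], parts[-3], parts[-2], parts[-1] on a list of length ≥ 4 (guarded, in range)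
      let ts := parts.getD 0 ""
      let name := parts.getD (parts.length - 3) ""
      let action := parts.getD (parts.length - 2) ""
      let book := parts.getD (parts.length - 1) ""
      let date := PySem.Str.replace (PySem.Str.slice ts none (some 10)) "-" "/"
      let time := PySem.Str.replace (PySem.Str.slice ts (some 11) none) "-" ":"
      let uo' := if name ∈ uo then uo else uo ++ [name]
      if action = "Borrow" then
        if bh.contains book then
          (out ++ [name ++ " requested " ++ book ++ " on " ++ date ++ " at " ++ time ++
                   " - book not available"], bh, uo')
        else
          (out ++ [name ++ " borrowed " ++ book ++ " on " ++ date ++ " at " ++ time],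
           bh.insert book name, uo')
      else if action = "Return" then
        -- book_holder.pop(book, None)
        (out ++ [name ++ " returned " ++ book ++ " on " ++ date ++ " at " ++ time],
         bh.erase book, uo')
      else (out, bh, uo')

def library_system_alt (lines : List String) : String :=
  PySem.Str.join "\n" (lines.foldl libB_step ([], PySem.Dict.empty, [])).1

-- ===== PRECONDITION & SPEC =====
def Spec_library_system (lines : List String) (out : String) : Prop := out = library_system_alt lines
instance (lines : List String) (out : String) : Decidable (Spec_library_system lines out) := by unfold Spec_library_system; infer_instance

-- ===== CLAIM (what is proved, stated in full; the proofs are below) =====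
def Claim_equal_library_system : Prop := ∀ (lines : List String), Dom_library_system lines → Spec_library_system lines (library_system lines)

-- ===== LEMMAS AND PROOFS =====

theorem split₀_go_words :
    ∀ (s cur : List Char) (acc : List (List Char)),
      (∀ c ∈ cur, PySem.Chars.isspace c = false) →
      (∀ w ∈ acc, w ≠ [] ∧ ∀ c ∈ w, PySem.Chars.isspace c = false) →
      ∀ w ∈ PySem.Chars.split₀.go s cur acc, w ≠ [] ∧ ∀ c ∈ w, PySem.Chars.isspace c = false := by
  intro s
  induction s with
  | nil =>
    intro cur acc hcur hacc w hw
    rw [PySem.Chars.split₀.go] at hw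
    by_cases h : cur.isEmpty
    · simp [h] at hw
      exact hacc w (by simpa using hw)
    · simp [h] at hw
      rcases hw.symm with h1 | h1
      · subst h1
        constructor
        · simpa [List.isEmpty_iff] using h
        · intro c hc; exact hcur c (by simpa using hc)
      · exact hacc w h1
  | cons c rest ih =>
    intro cur acc hcur hacc w hw
    rw [PySem.Chars.split₀.go] at hw
    by_cases hsp : PySem.Chars.isspace c
    · by_cases h : cur.isEmpty
      · simp [hsp, h] at hw
        exact ih [] acc (by simp) hacc w hw
      · simp [hsp, h] at hw
        refine ih [] (cur.reverse :: acc) (by simp) ?_ w hw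
        intro v hv
        rcases List.mem_cons.mp hv with hv | hv
        · subst hv
          exact ⟨by simpa [List.isEmpty_iff] using h, fun d hd => hcur d (by simpa using hd)⟩
        · exact hacc v hv
    · simp [hsp] at hw
      refine ih (c :: cur) acc ?_ hacc w hw
      intro d hd
      rcases List.mem_cons.mp hd with hd | hd
      · subst hd; simpa using hsp
      · exact hcur d hd

theorem split₀_words (s : List Char) :
    ∀ w ∈ PySem.Chars.split₀ s, w ≠ [] ∧ ∀ c ∈ w, PySem.Chars.isspace c = false := by
  intro w hw
  exact split₀_go_words s [] [] (by simp) (by simp) w hw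

theorem replace_go_no_nl (old new : List Char) (hn : '\n' ∉ new) :
    ∀ (fuel : Nat) (l acc : List Char), '\n' ∉ l → '\n' ∉ acc →
      '\n' ∉ PySem.Chars.replace.go old new fuel l acc := by
  intro fuel
  induction fuel with
  | zero =>
    intro l acc hl hacc
    rw [PySem.Chars.replace.go]
    simp [hl, hacc]
  | succ fuel ih =>
    intro l acc hl hacc
    cases l with
    | nil =>
      rw [PySem.Chars.replace.go]
      simp [hacc]
      try omega
    | cons c t =>
      rw [PySem.Chars.replace.go]
      by_cases hp : old.isPrefixOf (c :: t)
      · simp only [hp, if_true]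
        refine ih _ _ (fun h => hl (List.mem_of_mem_drop h)) ?_
        intro h
        rcases List.mem_append.mp h with h | h
        · exact hn (by simpa using h)
        · exact hacc h
      · simp only [hp]
        refine ih _ _ (fun h => hl (List.mem_cons_of_mem _ h)) ?_
        intro h
        rcases List.mem_cons.mp h with h | h
        · exact hl (h ▸ List.mem_cons_self)
        · exact hacc h

theorem replace_no_nl (s old new : List Char) (hold : old ≠ []) (hs : '\n' ∉ s)
    (hn : '\n' ∉ new) : '\n' ∉ PySem.Chars.replace s old new := by
  unfold PySem.Chars.replace
  simp [List.isEmpty_iff, hold]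
  exact replace_go_no_nl old new hn s.length s [] hs (by simp)

theorem chars_join_last (sep : List Char) :
    ∀ cls : List (List Char), cls ≠ [] → (∀ c ∈ cls, c ≠ []) →
      ∃ c, c ∈ cls ∧ (PySem.Chars.join sep cls).getLast? = c.getLast? := by
  intro cls
  induction cls with
  | nil => intro h; exact absurd rfl h
  | cons p rest ih =>
    intro _ hne
    cases rest with
    | nil => exact ⟨p, by simp, by rw [PySem.Chars.join_singleton]⟩
    | cons q t =>
      obtain ⟨c, hc, heq⟩ := ih (by simp) (fun d hd => hne d (List.mem_cons_of_mem _ hd))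
      have hcne : c ≠ [] := hne c (List.mem_cons_of_mem _ hc)
      have hjne : PySem.Chars.join sep (q :: t) ≠ [] := by
        intro h
        rw [h] at heq
        exact hcne (by simpa [List.getLast?_eq_none_iff, hcne] using heq.symm)
      refine ⟨c, List.mem_cons_of_mem _ hc, ?_⟩
      rw [PySem.Chars.join_cons_cons, List.append_assoc,
        List.getLast?_append_of_ne_nil _ (by simp [hjne]),
        List.getLast?_append_of_ne_nil _ hjne, heq]

def GoodStr (s : String) : Prop := s.toList ≠ [] ∧ '\n' ∉ s.toList
def GoodLine (s : String) : Prop := s.toList ≠ [] ∧ s.toList.getLast? ≠ some '\n'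

theorem goodline_append (s t : String) (ht : t.toList ≠ [])
    (hl : t.toList.getLast? ≠ some '\n') : GoodLine (s ++ t) := by
  refine ⟨by simp [String.toList_append, ht], ?_⟩
  rw [String.toList_append, List.getLast?_append_of_ne_nil _ ht]
  exact hl

theorem goodline_time (s time : String) (h : '\n' ∉ time.toList) :
    GoodLine (s ++ " at " ++ time) := by
  rcases eq_or_ne time.toList [] with he | he
  · refine ⟨by simp [String.toList_append, he], ?_⟩
    rw [String.toList_append, he, List.append_nil, String.toList_append,
      List.getLast?_append_of_ne_nil _ (by decide)]
    decide
  · refine goodline_append _ _ he ?_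
    intro hc
    exact h (List.mem_of_getLast? hc)

theorem join_comma_good (sb : List String) (hne : sb ≠ []) (hg : ∀ b ∈ sb, GoodStr b) :
    (PySem.Str.join ", " sb).toList ≠ [] ∧
      (PySem.Str.join ", " sb).toList.getLast? ≠ some '\n' := by
  rw [PySem.Str.toList_join]
  obtain ⟨c, hc, heq⟩ := chars_join_last ", ".toList (sb.map String.toList)
    (by simpa using hne)
    (by intro d hd; obtain ⟨b, hb, rfl⟩ := List.mem_map.mp hd; exact (hg b hb).1)
  obtain ⟨b, hb, rfl⟩ := List.mem_map.mp hc
  have hbne := (hg b hb).1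
  constructor
  · intro h
    rw [h] at heq
    exact hbne (by simpa [List.getLast?_eq_none_iff] using heq.symm)
  · rw [heq]
    intro hc2
    exact (hg b hb).2 (List.mem_of_getLast? hc2)

theorem erase_key_map_fst (book : String) :
    ∀ L : List (String × String), (L.map (fun p => p.1)).Nodup →
      ((L.filter (fun p => !(p.1 == book))).map (fun p => p.1)) =
        (L.map (fun p => p.1)).erase book := by
  intro L
  induction L with
  | nil => simp
  | cons p L ih =>
    intro hnd
    simp only [List.map_cons, List.nodup_cons] at hnd
    by_cases hp : p.1 = book
    · subst hp
      rw [List.filter_cons_of_neg (by simp), List.map_cons, List.erase_cons_head]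
      have : L.filter (fun q => !(q.1 == p.1)) = L := by
        apply List.filter_eq_self.mpr
        intro q hq
        simp only [Bool.not_eq_eq_eq_not, Bool.not_true, beq_eq_false_iff_ne, ne_eq]
        intro h
        exact hnd.1 (h ▸ List.mem_map_of_mem hq)
      rw [this]
    · rw [List.filter_cons_of_pos (by simpa using hp), List.map_cons, List.map_cons,
        List.erase_cons_tail (by simpa using hp), ih hnd.2]

theorem rstripNl_of_goodlast (s : String) (h : s.toList.getLast? ≠ some '\n') :
    pyRstripNl s = s := by
  unfold pyRstripNl
  cases hr : s.toList.reverse with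
  | nil =>
    have h0 : s.toList = [] := by simpa using congrArg List.reverse hr
    simp only [List.dropWhile_nil, List.reverse_nil]
    conv_rhs => rw [← @String.ofList_toList s, h0]
  | cons c t =>
    have hc : s.toList.getLast? = some c := by
      rw [← List.head?_reverse, hr]; rfl
    have : (c == '\n') = false := by
      simp only [beq_eq_false_iff_ne, ne_eq]
      intro he; exact h (he ▸ hc)
    rw [List.dropWhile_cons_of_neg (by simp [this]), ← hr, List.reverse_reverse,
      String.ofList_toList]

def InvLib (bh : PySem.Dict String String) (ub : PySem.Dict String (List String))
    (uo : List String) : Prop :=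
  bh.keys.Nodup ∧
  (∀ p ∈ bh.items, p.2 ∈ uo ∧ GoodStr p.1) ∧
  (∀ n : String, ub.contains n = true ↔ n ∈ uo) ∧
  (∀ person : String,
     ub.getD person [] = (bh.items.filter (fun p => p.2 == person)).map (fun p => p.1))

theorem register_inv (bh : PySem.Dict String String) (ub : PySem.Dict String (List String))
    (uo : List String) (name : String) (hI : InvLib bh ub uo) :
    (libA_register ub uo name).2 = (if name ∈ uo then uo else uo ++ [name]) ∧
    InvLib bh (libA_register ub uo name).1 (libA_register ub uo name).2 := by
  obtain ⟨hK, hW, hC, hG⟩ := hI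
  unfold libA_register
  by_cases hc : ub.contains name
  · have hm : name ∈ uo := (hC name).mp hc
    simp only [hc, if_true, hm]
    exact ⟨by first | rfl | trivial, hK, hW, hC, hG⟩
  · have hm : name ∉ uo := fun h => hc ((hC name).mpr h)
    simp only [hc, Bool.false_eq_true, if_false, if_neg hm]
    refine ⟨by first | rfl | trivial, hK, ?_, ?_, ?_⟩
    · intro p hp
      exact ⟨List.mem_append_left _ (hW p hp).1, (hW p hp).2⟩
    · intro n
      rw [PySem.Dict.contains_insert]
      constructor
      · intro h
        rcases Bool.or_eq_true_iff.mp h with h | h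
        · exact List.mem_append_right _ (by simpa using (eq_of_beq h))
        · exact List.mem_append_left _ ((hC n).mp h)
      · intro h
        rcases List.mem_append.mp h with h | h
        · simp [(hC n).mpr h]
        · simp [List.mem_singleton.mp h]
    · intro person
      by_cases hp : person = name
      · subst hp
        rw [PySem.Dict.getD_insert_self]
        symm
        rw [List.map_eq_nil_iff, List.filter_eq_nil_iff]
        intro p hp hq
        exact hm ((eq_of_beq hq) ▸ (hW p hp).1)
      · rw [PySem.Dict.getD_insert_of_ne _ _ _ hp]
        exact hG person

theorem borrow_inv (bh : PySem.Dict String String) (ub : PySem.Dict String (List String))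
    (uo : List String) (name book : String) (hI : InvLib bh ub uo)
    (hbook : bh.contains book = false) (hGb : GoodStr book) (hmem : name ∈ uo) :
    InvLib (bh.insert book name) (ub.modify name [] (· ++ [book])) uo := by
  obtain ⟨hK, hW, hC, hG⟩ := hI
  have hitems : (bh.insert book name).items = bh.items ++ [(book, name)] :=
    PySem.Dict.items_insert_of_not_contains bh name hbook
  refine ⟨PySem.Dict.nodup_keys_insert bh book name hK, ?_, ?_, ?_⟩
  · intro p hp
    rw [hitems] at hp
    rcases List.mem_append.mp hp with h | h
    · exact hW p h
    · rw [List.mem_singleton.mp h]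
      exact ⟨hmem, hGb⟩
  · intro n
    unfold PySem.Dict.modify
    rw [PySem.Dict.contains_insert]
    constructor
    · intro h
      rcases Bool.or_eq_true_iff.mp h with h | h
      · exact (eq_of_beq h) ▸ hmem
      · exact (hC n).mp h
    · intro h
      simp [(hC n).mpr h]
  · intro person
    by_cases hp : person = name
    · subst hp
      unfold PySem.Dict.modify
      rw [PySem.Dict.getD_insert_self, hitems, List.filter_append, List.map_append, hG person]
      simp
    · unfold PySem.Dict.modify
      rw [PySem.Dict.getD_insert_of_ne _ _ _ hp, hitems, List.filter_append, hG person]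
      have : List.filter (fun p => p.2 == person) [(book, name)] = [] := by
        simp [beq_iff_eq]
        exact fun h => hp h.symm
      rw [this, List.append_nil]

theorem return_facts (bh : PySem.Dict String String) (ub : PySem.Dict String (List String))
    (uo : List String) (book : String) (hI : InvLib bh ub uo)
    (hbook : bh.contains book = true) :
    (ub.contains (bh.getD book "") && ((ub.getD (bh.getD book "") []).contains book)) = true ∧
    PySem.List.remove? (ub.getD (bh.getD book "") []) book =
      some ((ub.getD (bh.getD book "") []).erase book) ∧
    InvLib (bh.erase book)
      (ub.insert (bh.getD book "") ((ub.getD (bh.getD book "") []).erase book)) uo := by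
  obtain ⟨hK, hW, hC, hG⟩ := hI
  obtain ⟨v, hv⟩ : ∃ v, bh.get? book = some v := by
    rcases h : bh.get? book with _ | v
    · rw [PySem.Dict.contains_eq_isSome_get?, h] at hbook
      simp at hbook
    · exact ⟨v, rfl⟩
  have hholder : bh.getD book "" = v := by
    unfold PySem.Dict.getD
    rw [hv]; rfl
  have hpair : (book, v) ∈ bh.items := PySem.Dict.mem_items_of_get?_eq_some bh hv
  have hvuo : v ∈ uo := (hW _ hpair).1
  have hmemb : book ∈ ub.getD v [] := by
    rw [hG v]
    exact List.mem_map_of_mem (List.mem_filter.mpr ⟨hpair, by simp⟩)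
  have hcontH : ub.contains v = true := (hC v).mpr hvuo
  have huniq : ∀ p ∈ bh.items, p.1 = book → p.2 = v := by
    intro p hp h1
    have : bh.get? book = some p.2 :=
      (PySem.Dict.get?_eq_some_iff_mem_items bh (k := book) (v := p.2) hK).mpr (by rw [← h1]; exact hp)
    rw [hv] at this
    exact (Option.some.inj this).symm
  have heitems : (bh.erase book).items = bh.items.filter (fun p => !(p.1 == book)) := rfl
  rw [hholder]
  refine ⟨by simp [hcontH, hmemb], 
    PySem.List.remove?_eq_some_erase _ _ hmemb, ?_, ?_, ?_, ?_⟩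
  · have : (bh.erase book).keys = (bh.items.filter (fun p => !(p.1 == book))).map (fun p => p.1) := rfl
    rw [this]
    exact hK.sublist (List.filter_sublist.map _)
  · intro p hp
    rw [heitems] at hp
    exact hW p (List.mem_of_mem_filter hp)
  · intro n
    rw [PySem.Dict.contains_insert]
    constructor
    · intro h
      rcases Bool.or_eq_true_iff.mp h with h | h
      · exact (eq_of_beq h) ▸ hvuo
      · exact (hC n).mp h
    · intro h
      simp [(hC n).mpr h]
  · intro person
    rw [heitems]
    by_cases hp : person = v
    · subst hp
      rw [PySem.Dict.getD_insert_self, hG person, List.filter_filter]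
      have hcomm : bh.items.filter (fun p => (p.2 == person) && !(p.1 == book)) =
          (bh.items.filter (fun p => p.2 == person)).filter (fun p => !(p.1 == book)) := by
        rw [List.filter_filter]
        apply List.filter_congr
        intro p _
        exact Bool.and_comm _ _
      rw [hcomm, erase_key_map_fst book _ (hK.sublist (List.filter_sublist.map _))]
    · rw [PySem.Dict.getD_insert_of_ne _ _ _ hp, hG person, List.filter_filter]
      apply congrArg
      apply List.filter_congr
      intro p hpmem
      by_cases h2 : p.2 == person
      · have : ¬ (p.1 = book) := by
          intro h1
          exact hp ((eq_of_beq h2).symm.trans (huniq p hpmem h1)) 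
        simp [h2, this]
      · simp [Bool.eq_false_iff.mpr h2]

theorem held_getD (bh : PySem.Dict String String) (ub : PySem.Dict String (List String))
    (hG : ∀ person : String,
      ub.getD person [] = (bh.items.filter (fun p => p.2 == person)).map (fun p => p.1)) :
    ∀ person : String,
      ((bh.items.foldl (fun d p => d.modify p.2 [] (· ++ [p.1]))
          (PySem.Dict.empty : PySem.Dict String (List String))).getD person [])
        = ub.getD person [] := by
  intro person
  have h1 : bh.items.foldl (fun d p => d.modify p.2 [] (· ++ [p.1]))
        (PySem.Dict.empty : PySem.Dict String (List String))
      = (bh.items.map (fun p => (p.2, p.1))).foldl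
          (fun d q => d.modify q.1 [] (· ++ [q.2])) PySem.Dict.empty := by
    rw [List.foldl_map]
  rw [h1, PySem.Dict.getD_foldl_modify_append, List.filter_map, List.map_map, hG person]
  simp only [PySem.Dict.getD, PySem.Dict.get?, PySem.Dict.empty, List.find?_nil, Option.map_none,
    Option.getD_none, List.nil_append]
  rfl

theorem word_good (line : String) (w : String) (hw : w ∈ PySem.Str.split₀ line) :
    GoodStr w ∧ ∀ c ∈ w.toList, PySem.Chars.isspace c = false := by
  have hmem : w.toList ∈ PySem.Chars.split₀ line.toList := by
    rw [← PySem.Str.split₀_map_toList]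
    exact List.mem_map_of_mem hw
  obtain ⟨h1, h2⟩ := split₀_words line.toList w.toList hmem
  refine ⟨⟨h1, fun hc => ?_⟩, h2⟩
  have := h2 _ hc
  simp [show PySem.Chars.isspace '\n' = true from by decide] at this

theorem slice_replace_no_nl (ts : String) (a? b? : Option Int) (new : String)
    (h : '\n' ∉ ts.toList) (hn : '\n' ∉ new.toList) :
    '\n' ∉ (PySem.Str.replace (PySem.Str.slice ts a? b?) "-" new).toList := by
  rw [PySem.Str.toList_replace, PySem.Str.toList_slice]
  refine replace_no_nl _ _ _ (by decide) ?_ hn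
  intro hc
  rw [PySem.Chars.slice_eq_listSlice] at hc
  exact h (PySem.List.mem_of_mem_slice _ _ _ hc)

theorem fold_out_good {α : Type} (f : List String → α → List String)
    (h : ∀ acc x, f acc x = acc ∨ ∃ m, f acc x = acc ++ [m] ∧ GoodLine m) :
    ∀ (xs : List α) (out : List String), (∀ l ∈ out, GoodLine l) →
      ∀ l ∈ xs.foldl f out, GoodLine l := by
  intro xs
  induction xs with
  | nil => intro out hO l hl; exact hO l hl
  | cons x t ih =>
    intro out hO
    refine ih (f out x) ?_
    rcases h out x with h1 | ⟨m, h1, h2⟩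
    · rw [h1]; exact hO
    · rw [h1]
      intro l hl
      rcases List.mem_append.mp hl with h | h
      · exact hO l h
      · rw [List.mem_singleton.mp h]; exact h2

theorem erase_not_contains {ν : Type} (d : PySem.Dict String ν) (k : String)
    (h : d.contains k = false) : d.erase k = d := by
  apply PySem.Dict.ext
  show List.filter _ _ = _
  apply List.filter_eq_self.mpr
  intro p hp
  unfold PySem.Dict.contains at h
  rw [List.any_eq_false] at h
  simpa using h p hp

theorem step_sim (raw : String) (out : List String) (bh : PySem.Dict String String)
    (ub : PySem.Dict String (List String)) (uo : List String)
    (hI : InvLib bh ub uo) (hO : ∀ l ∈ out, GoodLine l) :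
    libB_step (out, bh, uo) raw =
      ((libA_step (out, bh, ub, uo) raw).1, (libA_step (out, bh, ub, uo) raw).2.1,
        (libA_step (out, bh, ub, uo) raw).2.2.2) ∧
    InvLib (libA_step (out, bh, ub, uo) raw).2.1 (libA_step (out, bh, ub, uo) raw).2.2.1
      (libA_step (out, bh, ub, uo) raw).2.2.2 ∧
    ∀ l ∈ (libA_step (out, bh, ub, uo) raw).1, GoodLine l := by
  obtain ⟨hK, hW, hC, hG⟩ := hI
  have hI' : InvLib bh ub uo := ⟨hK, hW, hC, hG⟩
  have hOext : ∀ (m : String), GoodLine m → ∀ l ∈ out ++ [m], GoodLine l := by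
    intro m hm l hl
    rcases List.mem_append.mp hl with h | h
    · exact hO l h
    · rw [List.mem_singleton.mp h]; exact hm
  simp only [libA_step, libB_step, libA_fmt]
  by_cases h1 : PySem.Str.strip raw = ""
  · simp only [if_pos h1]
    exact ⟨by first | rfl | trivial, hI', hO⟩
  · simp only [if_neg h1]
    by_cases h2 : PySem.Str.strip raw = "Currently missing books."
    · simp only [if_pos h2]
      refine ⟨by first | rfl | trivial, hI', ?_⟩
      by_cases hm : PySem.List.sorted bh.keys (fun x => x) false = []
      · simp only [if_pos hm]
        exact hOext _ (by constructor <;> decide)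
      · simp only [if_neg hm]
        have hkeys : ∀ b ∈ PySem.List.sorted bh.keys (fun x => x) false, GoodStr b := by
          intro b hb
          have hbk : b ∈ bh.keys := (PySem.List.mem_sorted _ _ _ _).mp hb
          obtain ⟨p, hp, rfl⟩ := List.mem_map.mp hbk
          exact (hW p hp).2
        obtain ⟨hj1, hj2⟩ := join_comma_good _ hm hkeys
        exact hOext _ (goodline_append _ _ hj1 hj2)
    · simp only [if_neg h2]
      by_cases h3 : PySem.Str.strip raw = "Books borrowed by people."
      · simp only [if_pos h3]
        have hheld := held_getD bh ub hG
        refine ⟨?_, hI', ?_⟩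
        · have hfold :
              List.foldl (fun o person =>
                  if PySem.List.sorted
                      ((List.foldl (fun d p => d.modify p.2 [] fun x => x ++ [p.1])
                          PySem.Dict.empty bh.items).getD person []) (fun x => x) false = [] then o
                  else o ++ [person ++ " borrowed " ++
                    PySem.Int.toStr ((PySem.List.sorted
                      ((List.foldl (fun d p => d.modify p.2 [] fun x => x ++ [p.1])
                          PySem.Dict.empty bh.items).getD person []) (fun x => x) false).length : Int) ++
                    " books: " ++ PySem.Str.join ", " (PySem.List.sorted
                      ((List.foldl (fun d p => d.modify p.2 [] fun x => x ++ [p.1])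
                          PySem.Dict.empty bh.items).getD person []) (fun x => x) false)]) out uo =
              List.foldl (fun o person =>
                  if ub.getD person [] = [] then o
                  else o ++ [person ++ " borrowed " ++
                    PySem.Int.toStr ((PySem.List.sorted (ub.getD person []) (fun x => x) false).length : Int) ++
                    " books: " ++ PySem.Str.join ", "
                      (PySem.List.sorted (ub.getD person []) (fun x => x) false)]) out uo := by
            apply PySem.List.foldl_congr_mem
            intro acc x _
            simp only [hheld x, PySem.List.sorted_eq_nil_iff]
          simp only [hfold]
        · apply fold_out_good _ ?_ uo out hO
          intro acc x
          by_cases hx : ub.getD x [] = []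
          · left; simp [hx]
          · right
            refine ⟨x ++ " borrowed " ++
                PySem.Int.toStr ((PySem.List.sorted (ub.getD x []) (fun y => y) false).length : Int) ++
                " books: " ++ PySem.Str.join ", " (PySem.List.sorted (ub.getD x []) (fun y => y) false),
              by simp only [if_neg hx], ?_⟩
            have hsb : PySem.List.sorted (ub.getD x []) (fun y => y) false ≠ [] := by
              simpa [PySem.List.sorted_eq_nil_iff] using hx
            have hgood : ∀ b ∈ PySem.List.sorted (ub.getD x []) (fun y => y) false, GoodStr b := by
              intro b hb
              have := (PySem.List.mem_sorted _ _ _ _).mp hb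
              rw [hG x] at this
              obtain ⟨p, hp, rfl⟩ := List.mem_map.mp this
              exact (hW p (List.mem_of_mem_filter hp)).2
            obtain ⟨hj1, hj2⟩ := join_comma_good _ hsb hgood
            exact goodline_append _ _ hj1 hj2
      · simp only [if_neg h3]
        by_cases h5 : (PySem.Str.split₀ (PySem.Str.strip raw)).length < 4
        · simp only [if_pos h5]
          exact ⟨by first | rfl | trivial, hI', hO⟩
        · simp only [if_neg h5]
          have hlen : 4 ≤ (PySem.Str.split₀ (PySem.Str.strip raw)).length := by omega
          set P := PySem.Str.split₀ (PySem.Str.strip raw) with hPdef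
          have hmem : ∀ i, i < P.length → P.getD i "" ∈ P := by
            intro i hi
            rw [List.getD_eq_getElem P "" hi]
            exact List.getElem_mem hi
          have hts := word_good _ _ (hmem 0 (by omega))
          have hbk := word_good _ _ (hmem (P.length - 1) (by omega))
          have htime : '\n' ∉ (PySem.Str.replace
              (PySem.Str.slice (P.getD 0 "") (some 11) none) "-" ":").toList :=
            slice_replace_no_nl _ _ _ _ hts.1.2 (by decide)
          obtain ⟨r2eq, hIr⟩ :=
            register_inv bh ub uo (P.getD (P.length - 3) "") ⟨hK, hW, hC, hG⟩
          have hnmem : P.getD (P.length - 3) "" ∈ (libA_register ub uo (P.getD (P.length - 3) "")).2 := by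
            rw [r2eq]
            by_cases hn : P.getD (P.length - 3) "" ∈ uo
            · rw [if_pos hn]; exact hn
            · rw [if_neg hn]; exact List.mem_append_right _ (by simp)
          rw [← r2eq]
          by_cases hb : P.getD (P.length - 2) "" = "Borrow"
          · simp only [if_pos hb]
            by_cases hc : bh.contains (P.getD (P.length - 1) "")
            · simp only [if_pos hc]
              exact ⟨by first | rfl | trivial, hIr, hOext _ (goodline_append _ _ (by decide) (by decide))⟩
            · simp only [if_neg hc]
              refine ⟨by first | rfl | trivial, ?_, hOext _ (goodline_time _ _ htime)⟩
              exact borrow_inv _ _ _ _ _ hIr (Bool.eq_false_iff.mpr hc) hbk.1 hnmem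
          · simp only [if_neg hb]
            by_cases hr : P.getD (P.length - 2) "" = "Return"
            · simp only [if_pos hr]
              by_cases hc : bh.contains (P.getD (P.length - 1) "")
              · obtain ⟨hguard, hrem, hInew⟩ :=
                  return_facts bh (libA_register ub uo (P.getD (P.length - 3) "")).1
                    (libA_register ub uo (P.getD (P.length - 3) "")).2
                    (P.getD (P.length - 1) "") hIr hc
                simp only [if_pos hc, hguard, if_pos, hrem]
                exact ⟨by first | rfl | trivial, hInew, hOext _ (goodline_time _ _ htime)⟩
              · simp only [if_neg hc]
                rw [erase_not_contains _ _ (Bool.eq_false_iff.mpr hc)]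
                exact ⟨rfl, hIr, hOext _ (goodline_time _ _ htime)⟩
            · simp only [if_neg hr]
              exact ⟨by first | rfl | trivial, hIr, hO⟩

set_option maxHeartbeats 1000000 in
theorem fold_sim (lines : List String) :
    ∀ (out : List String) (bh : PySem.Dict String String)
      (ub : PySem.Dict String (List String)) (uo : List String),
      InvLib bh ub uo → (∀ l ∈ out, GoodLine l) →
      lines.foldl libB_step (out, bh, uo) =
        ((lines.foldl libA_step (out, bh, ub, uo)).1,
          (lines.foldl libA_step (out, bh, ub, uo)).2.1,
          (lines.foldl libA_step (out, bh, ub, uo)).2.2.2) ∧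
      ∀ l ∈ (lines.foldl libA_step (out, bh, ub, uo)).1, GoodLine l := by
  induction lines with
  | nil => intro out bh ub uo hI hO; exact ⟨rfl, hO⟩
  | cons x t ih =>
    intro out bh ub uo hI hO
    obtain ⟨heq, hInv, hOut⟩ := step_sim x out bh ub uo hI hO
    simp only [List.foldl_cons, heq]
    exact ih (libA_step (out, bh, ub, uo) x).1 (libA_step (out, bh, ub, uo) x).2.1
      (libA_step (out, bh, ub, uo) x).2.2.1 (libA_step (out, bh, ub, uo) x).2.2.2 hInv hOut

theorem inv_init : InvLib PySem.Dict.empty PySem.Dict.empty [] := by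
  refine ⟨?_, ?_, ?_, ?_⟩ <;>
    simp [PySem.Dict.empty, PySem.Dict.keys, PySem.Dict.contains,
      PySem.Dict.getD, PySem.Dict.get?]

-- ===== VERDICT (by name: the statement is the Claim_ definition above) =====
theorem library_system_spec : Claim_equal_library_system := by
  unfold Claim_equal_library_system Spec_library_system
  intro lines _
  unfold library_system library_system_alt
  obtain ⟨heq, hOut⟩ := fold_sim lines [] PySem.Dict.empty PySem.Dict.empty [] inv_init (by simp)
  rw [heq]
  apply rstripNl_of_goodlast
  rw [PySem.Str.toList_join]
  rcases eq_or_ne (lines.foldl libA_step ([], PySem.Dict.empty, PySem.Dict.empty, [])).1 []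
    with h | h
  · rw [h]
    simp [PySem.Chars.join_nil]
  · obtain ⟨c, hc, hceq⟩ := chars_join_last "\n".toList
      (List.map String.toList (lines.foldl libA_step ([], PySem.Dict.empty, PySem.Dict.empty, [])).1)
      (by simpa using h)
      (by
        intro d hd
        obtain ⟨b, hb, rfl⟩ := List.mem_map.mp hd
        exact (hOut b hb).1)
    rw [hceq]
    obtain ⟨b, hb, rfl⟩ := List.mem_map.mp hc
    exact (hOut b hb).2
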